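-- pv_equiv track=rewrite | github.com/TheAuditorTool/Auditor | tests/fixtures/python/performance_patterns.py | triple_nested_tensor_op
-- ===== SOURCE A (Python) =====
-- def triple_nested_tensor_op(tensor):
--     """Test O(n^4) operation."""
--     result = []
--     for i in range(len(tensor)):
--         plane = []
--         for j in range(len(tensor[i])):
--             row = []
--             for k in range(len(tensor[i][j])):
--                 col = []
--                 for l in range(len(tensor[i][j][k])):  # 4-level nesting
--                     col.append(tensor[i][j][k][l] ** 2)
--                 row.append(col)
--             plane.append(row)
--         result.append(plane)
--     return result
-- ===== SOURCE B (Python) =====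
-- def triple_nested_tensor_op(tensor):
--     """Square every element of a 4D nested list via one depth-parameterized recursion."""
--     def rec(t, d):
--         if d == 4:
--             return t ** 2
--         return [rec(x, d + 1) for x in t]
--     return rec(tensor, 0)
-- ===== Notes on version B (the rewrite author's own statement) =====
-- stated objective: simpler
-- what changed: Replaced four hard-coded index loops (range(len(...)) with repeated subscripting) by a single depth-parameterized recursive descent that squares at depth 4.
import Mathlib
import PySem

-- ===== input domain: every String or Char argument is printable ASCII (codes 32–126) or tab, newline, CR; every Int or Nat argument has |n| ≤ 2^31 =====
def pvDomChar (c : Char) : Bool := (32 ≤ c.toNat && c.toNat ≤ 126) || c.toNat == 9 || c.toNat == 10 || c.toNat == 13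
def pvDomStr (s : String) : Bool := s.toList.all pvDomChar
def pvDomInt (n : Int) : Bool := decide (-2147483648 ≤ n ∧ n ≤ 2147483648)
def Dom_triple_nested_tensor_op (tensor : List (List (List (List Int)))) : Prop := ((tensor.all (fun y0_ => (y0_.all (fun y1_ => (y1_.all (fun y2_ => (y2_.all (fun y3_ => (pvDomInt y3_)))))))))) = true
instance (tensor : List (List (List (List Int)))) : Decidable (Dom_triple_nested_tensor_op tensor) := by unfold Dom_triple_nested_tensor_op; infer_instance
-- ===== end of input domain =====

-- B replaces A's four hard-coded index loops by one depth-parameterized recursive descent (simpler); same values everywhere.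

-- ===== PORT A =====
-- literal transliteration: four nested 'for _ in range(len(...))' loops, each appending to an accumulator, with repeated subscripting
def triple_nested_tensor_op (tensor : List (List (List (List Int)))) : List (List (List (List Int))) :=
  (PySem.List.pyRange 0 (PySem.List.len tensor) 1).foldl (fun result i =>
    result ++ [
      (PySem.List.pyRange 0 (PySem.List.len (PySem.List.pyGetD tensor i [])) 1).foldl (fun plane j =>
        plane ++ [
          (PySem.List.pyRange 0 (PySem.List.len (PySem.List.pyGetD (PySem.List.pyGetD tensor i []) j [])) 1).foldl (fun row k =>
            row ++ [
              (PySem.List.pyRange 0 (PySem.List.len (PySem.List.pyGetD (PySem.List.pyGetD (PySem.List.pyGetD tensor i []) j []) k [])) 1).foldl (fun col l =>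
                col ++ [(PySem.List.pyGetD (PySem.List.pyGetD (PySem.List.pyGetD (PySem.List.pyGetD tensor i []) j []) k []) l 0) ^ 2]) []
            ]) []
        ]) []
    ]) []

-- ===== PORT B =====
-- Source B's depth-parameterized recursion rec(t, d); Lean's types differ at each depth, so rec is
-- monomorphised into one map per depth level, each being '[rec(x, d+1) for x in t]'.
def pvRec4 (x : Int) : Int := x ^ 2
def pvRec3 (t : List Int) : List Int := t.map pvRec4
def pvRec2 (t : List (List Int)) : List (List Int) := t.map pvRec3
def pvRec1 (t : List (List (List Int))) : List (List (List Int)) := t.map pvRec2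
def triple_nested_tensor_op_alt (tensor : List (List (List (List Int)))) : List (List (List (List Int))) :=
  tensor.map pvRec1

-- ===== PRECONDITION & SPEC =====
def Spec_triple_nested_tensor_op (tensor : List (List (List (List Int)))) (out : List (List (List (List Int)))) : Prop := out = triple_nested_tensor_op_alt tensor
instance (tensor : List (List (List (List Int)))) (out : List (List (List (List Int)))) : Decidable (Spec_triple_nested_tensor_op tensor out) := by unfold Spec_triple_nested_tensor_op; infer_instance

-- ===== CLAIM (what is proved, stated in full; the proofs are below) =====
def Claim_equal_triple_nested_tensor_op : Prop := ∀ (tensor : List (List (List (List Int)))), Dom_triple_nested_tensor_op tensor → Spec_triple_nested_tensor_op tensor (triple_nested_tensor_op tensor)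

-- ===== LEMMAS AND PROOFS =====

-- an append-accumulating fold is a map
theorem pv_foldl_append_map {α β : Type} (f : α → β) (xs : List α) (acc : List β) :
    xs.foldl (fun a x => a ++ [f x]) acc = acc ++ xs.map f := by
  induction xs generalizing acc with
  | nil => simp
  | cons x xs ih => simp [List.foldl, ih]

-- ===== VERDICT (by name: the statement is the Claim_ definition above) =====
-- one Python level 'for i in range(len(xs)): acc.append(g(xs[i]))' is xs.map g
theorem pv_level {α β : Type} (g : α → β) (xs : List α) (d : α) :
    (PySem.List.pyRange 0 (PySem.List.len xs) 1).foldl (fun acc i => acc ++ [g (PySem.List.pyGetD xs i d)]) [] = xs.map g := by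
  rw [PySem.List.foldl_pyRange_zero_pyGetD xs d (fun acc x => acc ++ [g x]) []]
  exact pv_foldl_append_map g xs []

-- proof-only names for A's four loop levels (each definitionally equal to the corresponding fold in the port)
def pvA3 (v : List Int) : List Int :=
  (PySem.List.pyRange 0 (PySem.List.len v) 1).foldl (fun col l => col ++ [(PySem.List.pyGetD v l 0) ^ 2]) []
def pvA2 (u : List (List Int)) : List (List Int) :=
  (PySem.List.pyRange 0 (PySem.List.len u) 1).foldl (fun row k => row ++ [pvA3 (PySem.List.pyGetD u k [])]) []
def pvA1 (t : List (List (List Int))) : List (List (List Int)) :=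
  (PySem.List.pyRange 0 (PySem.List.len t) 1).foldl (fun plane j => plane ++ [pvA2 (PySem.List.pyGetD t j [])]) []

theorem pvA3_eq (v : List Int) : pvA3 v = pvRec3 v := pv_level pvRec4 v 0

theorem pvA2_eq (u : List (List Int)) : pvA2 u = pvRec2 u := by
  have h : pvA2 u = u.map pvA3 := pv_level pvA3 u []
  rw [h, pvRec2]
  exact List.map_congr_left (fun v _ => pvA3_eq v)

theorem pvA1_eq (t : List (List (List Int))) : pvA1 t = pvRec1 t := by
  have h : pvA1 t = t.map pvA2 := pv_level pvA2 t []
  rw [h, pvRec1]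
  exact List.map_congr_left (fun u _ => pvA2_eq u)

theorem triple_nested_tensor_op_spec : Claim_equal_triple_nested_tensor_op := by
  intro tensor _
  show triple_nested_tensor_op tensor = triple_nested_tensor_op_alt tensor
  have h : triple_nested_tensor_op tensor = tensor.map pvA1 := pv_level pvA1 tensor []
  rw [h, triple_nested_tensor_op_alt]
  exact List.map_congr_left (fun t _ => pvA1_eq t)
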